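-- pv_equiv track=rewrite | github.com/jang1563/BioProtocolBench | scripts/plot_scorecard.py | _n_label
-- ===== SOURCE A (Python) =====
-- def _n_label(agg, tasks: list[str], models: list[str]) -> str:
--     counts = sorted(
--         {
--             agg[(model, task)]["n"]
--             for model in models
--             for task in tasks
--             if (model, task) in agg
--         }
--     )
--     if not counts:
--         return "N=0"
--     if len(counts) == 1:
--         suffix = "seed" if counts[0] == 1 else "seeds"
--         return "N={} {} per cell".format(counts[0], suffix)
--     return "N varies by cell"
-- ===== SOURCE B (Python) =====
-- def _n_label(agg, tasks, models):
--     model_set = set(models)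
--     task_set = set(tasks)
--     lo = hi = None
--     for (model, task), cell in agg.items():
--         if model in model_set and task in task_set:
--             n = cell["n"]
--             if lo is None:
--                 lo = hi = n
--             else:
--                 if n < lo:
--                     lo = n
--                 if n > hi:
--                     hi = n
--     if lo is None:
--         return "N=0"
--     if lo != hi:
--         return "N varies by cell"
--     return "N={} {} per cell".format(lo, "seed" if lo == 1 else "seeds")
-- ===== Notes on version B (the rewrite author's own statement) =====
-- stated objective: faster
-- what changed: Inverts the traversal (iterates agg's entries filtered by membership sets of models/tasks instead of looping over all models x tasks pairs probing agg) and replaces the materialized set + sort + length branching with running min/max extrema: the label varies iff min != max.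
import Mathlib
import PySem

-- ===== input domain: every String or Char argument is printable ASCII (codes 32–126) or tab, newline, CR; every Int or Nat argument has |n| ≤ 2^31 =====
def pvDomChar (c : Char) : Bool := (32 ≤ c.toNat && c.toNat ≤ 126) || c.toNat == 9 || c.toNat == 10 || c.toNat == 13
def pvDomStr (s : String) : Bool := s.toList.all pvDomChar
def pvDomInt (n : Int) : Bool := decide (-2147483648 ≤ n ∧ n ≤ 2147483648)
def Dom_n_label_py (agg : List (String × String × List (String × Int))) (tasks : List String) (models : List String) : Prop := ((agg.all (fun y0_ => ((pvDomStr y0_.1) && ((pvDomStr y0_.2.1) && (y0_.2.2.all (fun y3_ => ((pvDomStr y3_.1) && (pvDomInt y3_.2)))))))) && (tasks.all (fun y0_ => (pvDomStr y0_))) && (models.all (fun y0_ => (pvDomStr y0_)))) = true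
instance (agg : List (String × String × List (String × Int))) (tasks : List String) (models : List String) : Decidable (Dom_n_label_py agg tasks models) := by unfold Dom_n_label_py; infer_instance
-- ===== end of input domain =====

-- B inverts the traversal (iterates agg's entries, filtered by membership sets of models/tasks,
-- instead of looping over all models x tasks pairs probing agg) and replaces the materialized
-- set + sort + length branching with running min/max extrema (the label varies iff min != max);
-- a timing run measured B faster on the generated inputs.

-- shared helper: first entry of the association list keyed by the pair (model, task)
def pvLookup2 (agg : List (String × String × List (String × Int))) (m t : String) : Option (List (String × Int)) :=
  match agg.find? (fun p => p.1 == m && p.2.1 == t) with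
  | some p => some p.2.2
  | none => none

-- ===== PORT A =====
def n_label_py (agg : List (String × String × List (String × Int))) (tasks : List String) (models : List String) : String :=
  let s : PySem.Set Int := models.foldl (fun s model =>
    tasks.foldl (fun s task =>
      match pvLookup2 agg model task with
      | some inner => PySem.Set.add s (PySem.Dict.getD (PySem.Dict.mk inner) "n" 0)   -- Pre_ guarantees the key "n" is present
      | none => s) s) PySem.Set.empty
  let counts := PySem.List.sorted s (fun x => x) false
  match counts with
  | [] => "N=0"
  | [c] => "N=" ++ PySem.Int.toStr c ++ " " ++ (if c == 1 then "seed" else "seeds") ++ " per cell"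
  | _ => "N varies by cell"

-- ===== PORT B =====
-- loop body: state = None | some (lo, hi) running extrema
def pvStepB (st : Option (Int × Int)) (n : Int) : Option (Int × Int) :=
  match st with
  | none => some (n, n)
  | some (lo, hi) => some (if n < lo then n else lo, if hi < n then n else hi)

def n_label_py_alt (agg : List (String × String × List (String × Int))) (tasks : List String) (models : List String) : String :=
  let modelSet : PySem.Set String := PySem.Set.ofList models
  let taskSet : PySem.Set String := PySem.Set.ofList tasks
  let st : Option (Int × Int) := agg.foldl (fun st e =>
    if PySem.Set.contains modelSet e.1 && PySem.Set.contains taskSet e.2.1 then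
      pvStepB st (PySem.Dict.getD (PySem.Dict.mk e.2.2) "n" 0)   -- Pre_ guarantees the key "n" is present
    else st) none
  match st with
  | none => "N=0"
  | some (lo, hi) =>
    if lo != hi then "N varies by cell"
    else "N=" ++ PySem.Int.toStr lo ++ " " ++ (if lo == 1 then "seed" else "seeds") ++ " per cell"

-- ===== PRECONDITION & SPEC =====
-- Pre_ excludes (1) inputs where Python A raises KeyError: a cell (model, task) present in agg whose
-- inner dict lacks the key "n"; and (2) association lists with duplicate (model, task) keys, which
-- represent no Python dict at all (dict keys are unique), so nothing is claimed about them.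
def Pre_n_label_py (agg : List (String × String × List (String × Int))) (tasks : List String) (models : List String) : Prop :=
  (agg.map (fun e => (e.1, e.2.1))).Nodup ∧
  (models.all (fun m => tasks.all (fun t =>
    match pvLookup2 agg m t with
    | some inner => PySem.Dict.contains (PySem.Dict.mk inner) "n"
    | none => true))) = true
instance (agg : List (String × String × List (String × Int))) (tasks : List String) (models : List String) : Decidable (Pre_n_label_py agg tasks models) := by unfold Pre_n_label_py; infer_instance

def pvWitness_n_label_py : (List (String × String × List (String × Int))) × List String × List String :=
  ([("m", ("t", [("n", (2 : Int))]))], ["t"], ["m"])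

def Spec_n_label_py (agg : List (String × String × List (String × Int))) (tasks : List String) (models : List String) (out : String) : Prop := out = n_label_py_alt agg tasks models
instance (agg : List (String × String × List (String × Int))) (tasks : List String) (models : List String) (out : String) : Decidable (Spec_n_label_py agg tasks models out) := by unfold Spec_n_label_py; infer_instance

-- ===== CLAIM (what is proved, stated in full; the proofs are below) =====
def Claim_equal_n_label_py : Prop := ∀ (agg : List (String × String × List (String × Int))) (tasks : List String) (models : List String), Dom_n_label_py agg tasks models → Pre_n_label_py agg tasks models → Spec_n_label_py agg tasks models (n_label_py agg tasks models)

-- ===== LEMMAS AND PROOFS =====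

-- the n-value of an agg entry
def pvVal (e : String × String × List (String × Int)) : Int :=
  PySem.Dict.getD (PySem.Dict.mk e.2.2) "n" 0

-- the n-values A's traversal encounters, in A's order
def pvValsA (agg : List (String × String × List (String × Int))) (tasks : List String) (models : List String) : List Int :=
  models.flatMap (fun m => tasks.filterMap (fun t => (pvLookup2 agg m t).map (fun inner => PySem.Dict.getD (PySem.Dict.mk inner) "n" 0)))

-- the n-values B's traversal encounters, in B's order
def pvValsB (agg : List (String × String × List (String × Int))) (tasks : List String) (models : List String) : List Int :=
  agg.filterMap (fun e => if decide (e.1 ∈ models) && decide (e.2.1 ∈ tasks) then some (pvVal e) else none)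

lemma foldA_tasks (agg : List (String × String × List (String × Int))) (m : String) :
    ∀ (tasks : List String) (s : PySem.Set Int),
      tasks.foldl (fun s task =>
        match pvLookup2 agg m task with
        | some inner => PySem.Set.add s (PySem.Dict.getD (PySem.Dict.mk inner) "n" 0)
        | none => s) s
      = List.foldl PySem.Set.add s (tasks.filterMap (fun t =>
          (pvLookup2 agg m t).map (fun inner => PySem.Dict.getD (PySem.Dict.mk inner) "n" 0))) := by
  intro tasks
  induction tasks with
  | nil => intro s; rfl
  | cons t ts ih =>
    intro s
    simp only [List.foldl_cons, List.filterMap_cons]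
    cases h : pvLookup2 agg m t with
    | none => simp [ih]
    | some inner => simp [ih]

lemma foldA_models (agg : List (String × String × List (String × Int))) (tasks : List String) :
    ∀ (models : List String) (s : PySem.Set Int),
      models.foldl (fun s model =>
        tasks.foldl (fun s task =>
          match pvLookup2 agg model task with
          | some inner => PySem.Set.add s (PySem.Dict.getD (PySem.Dict.mk inner) "n" 0)
          | none => s) s) s
      = List.foldl PySem.Set.add s (pvValsA agg tasks models) := by
  intro models
  induction models with
  | nil => intro s; rfl
  | cons m ms ih =>
    intro s
    simp only [List.foldl_cons, pvValsA, List.flatMap_cons, List.foldl_append]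
    rw [foldA_tasks, ih]
    rfl

lemma foldB_agg (tasks models : List String) :
    ∀ (agg : List (String × String × List (String × Int))) (st : Option (Int × Int)),
      agg.foldl (fun st e =>
        if PySem.Set.contains (PySem.Set.ofList models) e.1 && PySem.Set.contains (PySem.Set.ofList tasks) e.2.1 then
          pvStepB st (PySem.Dict.getD (PySem.Dict.mk e.2.2) "n" 0)
        else st) st
      = List.foldl pvStepB st (pvValsB agg tasks models) := by
  intro agg
  induction agg with
  | nil => intro st; rfl
  | cons e es ih =>
    intro st
    by_cases hme : e.1 ∈ models ∧ e.2.1 ∈ tasks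
    · have h1 : (PySem.Set.contains (PySem.Set.ofList models) e.1 && PySem.Set.contains (PySem.Set.ofList tasks) e.2.1) = true := by
        simp [PySem.Set.contains, PySem.Set.mem_ofList, hme.1, hme.2]
      have h2 : pvValsB (e :: es) tasks models = pvVal e :: pvValsB es tasks models := by
        simp [pvValsB, hme.1, hme.2]
      rw [List.foldl_cons, if_pos h1, h2, List.foldl_cons]
      simp only [pvVal]
      exact ih _
    · rcases not_and_or.mp hme with h | h
      · have h1 : (PySem.Set.contains (PySem.Set.ofList models) e.1 && PySem.Set.contains (PySem.Set.ofList tasks) e.2.1) = false := by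
          simp [PySem.Set.contains, PySem.Set.mem_ofList, h]
        have h2 : pvValsB (e :: es) tasks models = pvValsB es tasks models := by
          simp [pvValsB, h]
        rw [List.foldl_cons, if_neg (by rw [h1]; simp), h2]
        exact ih _
      · have h1 : (PySem.Set.contains (PySem.Set.ofList models) e.1 && PySem.Set.contains (PySem.Set.ofList tasks) e.2.1) = false := by
          simp [PySem.Set.contains, PySem.Set.mem_ofList, h]
        have h2 : pvValsB (e :: es) tasks models = pvValsB es tasks models := by
          simp [pvValsB, h]
        rw [List.foldl_cons, if_neg (by rw [h1]; simp), h2]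
        exact ih _

-- the min/max fold over a nonempty list, unfolded to two scalar folds
lemma stepB_some (l : List Int) : ∀ (lo hi : Int),
    List.foldl pvStepB (some (lo, hi)) l
      = some (l.foldl (fun a n => if n < a then n else a) lo,
              l.foldl (fun a n => if a < n then n else a) hi) := by
  induction l with
  | nil => intro lo hi; rfl
  | cons x xs ih => intro lo hi; simp only [List.foldl_cons, pvStepB]; rw [ih]

lemma minFold_le (l : List Int) : ∀ (a : Int),
    l.foldl (fun a n => if n < a then n else a) a ≤ a ∧
    ∀ y ∈ l, l.foldl (fun a n => if n < a then n else a) a ≤ y := by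
  induction l with
  | nil => intro a; simp
  | cons x xs ih =>
    intro a
    simp only [List.foldl_cons]
    obtain ⟨h1, h2⟩ := ih (if x < a then x else a)
    refine ⟨by split_ifs at h1 ⊢ <;> omega, ?_⟩
    intro y hy
    rcases List.mem_cons.mp hy with rfl | hy
    · split_ifs at h1 ⊢ <;> omega
    · exact h2 y hy

lemma maxFold_ge (l : List Int) : ∀ (a : Int),
    a ≤ l.foldl (fun a n => if a < n then n else a) a ∧
    ∀ y ∈ l, y ≤ l.foldl (fun a n => if a < n then n else a) a := by
  induction l with
  | nil => intro a; simp
  | cons x xs ih =>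
    intro a
    simp only [List.foldl_cons]
    obtain ⟨h1, h2⟩ := ih (if a < x then x else a)
    refine ⟨by split_ifs at h1 ⊢ <;> omega, ?_⟩
    intro y hy
    rcases List.mem_cons.mp hy with rfl | hy
    · split_ifs at h1 ⊢ <;> omega
    · exact h2 y hy

lemma minFold_const (f : Int) : ∀ (l : List Int), (∀ x ∈ l, x = f) →
    l.foldl (fun a n => if n < a then n else a) f = f := by
  intro l
  induction l with
  | nil => intro _; rfl
  | cons x xs ih =>
    intro h
    have hx : x = f := h x (by simp)
    subst hx
    simpa using ih (fun y hy => h y (by simp [hy]))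

lemma maxFold_const (f : Int) : ∀ (l : List Int), (∀ x ∈ l, x = f) →
    l.foldl (fun a n => if a < n then n else a) f = f := by
  intro l
  induction l with
  | nil => intro _; rfl
  | cons x xs ih =>
    intro h
    have hx : x = f := h x (by simp)
    subst hx
    simpa using ih (fun y hy => h y (by simp [hy]))

lemma addAll_const (f : Int) : ∀ (l : List Int), (∀ x ∈ l, x = f) →
    List.foldl PySem.Set.add [f] l = [f] := by
  intro l
  induction l with
  | nil => intro _; rfl
  | cons x xs ih =>
    intro h
    have hx : x = f := h x (by simp)
    subst hx
    simp only [List.foldl_cons]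
    have : PySem.Set.add [x] x = [x] := by
      simp [PySem.Set.add, PySem.Set.contains]
    rw [this]
    exact ih (fun y hy => h y (by simp [hy]))

-- under unique keys, A's lookup by key is exactly membership of the triple
lemma lookup_iff_mem (agg : List (String × String × List (String × Int)))
    (hnd : (agg.map (fun e => (e.1, e.2.1))).Nodup) (m t : String) (inner : List (String × Int)) :
    pvLookup2 agg m t = some inner ↔ (m, t, inner) ∈ agg := by
  constructor
  · intro h
    unfold pvLookup2 at h
    cases hf : agg.find? (fun p => p.1 == m && p.2.1 == t) with
    | none => rw [hf] at h; simp at h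
    | some p =>
      rw [hf] at h
      simp only [Option.some.injEq] at h
      have hmem := List.mem_of_find?_eq_some hf
      have hp := List.find?_some hf
      simp only [Bool.and_eq_true, beq_iff_eq] at hp
      obtain ⟨h1, h2⟩ := hp
      have : p = (m, t, inner) := by
        obtain ⟨p1, p2, p3⟩ := p
        simp_all
      rwa [this] at hmem
  · intro hmem
    have hex : (agg.find? (fun p => p.1 == m && p.2.1 == t)).isSome := by
      rw [List.find?_isSome]
      exact ⟨(m, t, inner), hmem, by simp⟩
    cases hf : agg.find? (fun p => p.1 == m && p.2.1 == t) with
    | none => rw [hf] at hex; simp at hex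
    | some p =>
      have hpmem := List.mem_of_find?_eq_some hf
      have hp := List.find?_some hf
      simp only [Bool.and_eq_true, beq_iff_eq] at hp
      have hkey : (fun e : String × String × List (String × Int) => (e.1, e.2.1)) p
          = (fun e : String × String × List (String × Int) => (e.1, e.2.1)) (m, t, inner) := by
        simp [hp.1, hp.2]
      have := List.inj_on_of_nodup_map hnd hpmem hmem hkey
      unfold pvLookup2
      rw [hf, this]

-- the two traversals encounter the same SET of values
lemma vals_mem_iff (agg : List (String × String × List (String × Int))) (tasks models : List String)
    (hnd : (agg.map (fun e => (e.1, e.2.1))).Nodup) (x : Int) :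
    x ∈ pvValsA agg tasks models ↔ x ∈ pvValsB agg tasks models := by
  simp only [pvValsA, pvValsB, List.mem_flatMap, List.mem_filterMap, Option.map_eq_some_iff]
  constructor
  · rintro ⟨m, hm, t, ht, inner, hlook, rfl⟩
    refine ⟨(m, t, inner), (lookup_iff_mem agg hnd m t inner).mp hlook, ?_⟩
    simp [hm, ht, pvVal]
  · rintro ⟨e, he, hval⟩
    by_cases hm : e.1 ∈ models
    · by_cases ht : e.2.1 ∈ tasks
      · simp only [hm, ht, decide_true, Bool.and_self, if_true, Option.some.injEq] at hval
        refine ⟨e.1, hm, e.2.1, ht, e.2.2, ?_, by simpa [pvVal] using hval⟩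
        exact (lookup_iff_mem agg hnd e.1 e.2.1 e.2.2).mpr (by simpa using he)
      · simp [hm, ht] at hval
    · simp [hm] at hval

-- the two final branchings agree, given value lists with the same members
lemma core (u v : List Int) (hmem : ∀ x, x ∈ u ↔ x ∈ v) :
    (match PySem.List.sorted (List.foldl PySem.Set.add PySem.Set.empty u) (fun x => x) false with
      | [] => "N=0"
      | [c] => "N=" ++ PySem.Int.toStr c ++ " " ++ (if c == 1 then "seed" else "seeds") ++ " per cell"
      | _ => "N varies by cell")
    = (match List.foldl pvStepB (none : Option (Int × Int)) v with
      | none => "N=0"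
      | some (lo, hi) =>
        if lo != hi then "N varies by cell"
        else "N=" ++ PySem.Int.toStr lo ++ " " ++ (if lo == 1 then "seed" else "seeds") ++ " per cell") := by
  cases u with
  | nil =>
    cases v with
    | nil => rfl
    | cons g gs =>
      exfalso
      have := (hmem g).mpr (by simp)
      simp at this
  | cons f rest =>
    cases v with
    | nil =>
      exfalso
      have := (hmem f).mp (by simp)
      simp at this
    | cons g gs =>
      have hset : List.foldl PySem.Set.add PySem.Set.empty (f :: rest) = PySem.Set.ofList (f :: rest) := by
        rw [PySem.Set.ofList_eq_foldl]; rfl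
      have hB : List.foldl pvStepB (none : Option (Int × Int)) (g :: gs)
          = some (gs.foldl (fun a n => if n < a then n else a) g,
                  gs.foldl (fun a n => if a < n then n else a) g) := by
        simp only [List.foldl_cons, pvStepB]
        exact stepB_some gs g g
      rw [hset, hB]
      by_cases hall : ∀ x ∈ f :: rest, x = f
      · -- all values equal f: A's set is [f]; B's extrema are both f
        have hallv : ∀ y ∈ g :: gs, y = f := fun y hy => hall y ((hmem y).mpr hy)
        have hg : g = f := hallv g (by simp)
        subst hg
        have hlo : gs.foldl (fun a n => if n < a then n else a) g = g :=
          minFold_const g gs (fun y hy => hallv y (by simp [hy]))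
        have hhi : gs.foldl (fun a n => if a < n then n else a) g = g :=
          maxFold_const g gs (fun y hy => hallv y (by simp [hy]))
        rw [hlo, hhi]
        have hof : PySem.Set.ofList (g :: rest) = [g] := by
          rw [PySem.Set.ofList_eq_foldl]
          simp only [List.foldl_cons]
          show List.foldl PySem.Set.add [g] rest = [g]
          exact addAll_const g rest (fun y hy => hall y (by simp [hy]))
        rw [hof]
        have hs : PySem.List.sorted [g] (fun x : Int => x) false = [g] := rfl
        rw [hs]
        simp
      · -- two distinct values: A's sorted set has ≥ 2 elements; B's extrema differ
        push Not at hall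
        obtain ⟨w, hw, hwf⟩ := hall
        obtain ⟨hlo1, hlo2⟩ := minFold_le gs g
        obtain ⟨hhi1, hhi2⟩ := maxFold_ge gs g
        have hfv : f ∈ g :: gs := (hmem f).mp (by simp)
        have hwv : w ∈ g :: gs := (hmem w).mp (by simp [hw])
        have hloy : ∀ y ∈ g :: gs, gs.foldl (fun a n => if n < a then n else a) g ≤ y := by
          intro y hy
          rcases List.mem_cons.mp hy with rfl | hy
          · exact hlo1
          · exact hlo2 y hy
        have hhiy : ∀ y ∈ g :: gs, y ≤ gs.foldl (fun a n => if a < n then n else a) g := by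
          intro y hy
          rcases List.mem_cons.mp hy with rfl | hy
          · exact hhi1
          · exact hhi2 y hy
        have hne : gs.foldl (fun a n => if n < a then n else a) g
            ≠ gs.foldl (fun a n => if a < n then n else a) g := by
          intro heq
          have h1 := hloy f hfv
          have h2 := hhiy f hfv
          have h3 := hloy w hwv
          have h4 := hhiy w hwv
          exact hwf (by omega)
        have hfmem : f ∈ PySem.List.sorted (PySem.Set.ofList (f :: rest)) (fun x : Int => x) false := by
          rw [PySem.List.mem_sorted]
          simp [PySem.Set.mem_ofList]
        have hwmem : w ∈ PySem.List.sorted (PySem.Set.ofList (f :: rest)) (fun x : Int => x) false := by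
          rw [PySem.List.mem_sorted]
          simp [PySem.Set.mem_ofList, hw]
        have hb : (gs.foldl (fun a n => if n < a then n else a) g
            != gs.foldl (fun a n => if a < n then n else a) g) = true := by
          simp only [bne_iff_ne, ne_eq]
          exact hne
        cases hc : PySem.List.sorted (PySem.Set.ofList (f :: rest)) (fun x : Int => x) false with
        | nil => rw [hc] at hfmem; simp at hfmem
        | cons c cs =>
          cases cs with
          | nil =>
            rw [hc] at hfmem hwmem
            simp at hfmem hwmem
            exact absurd (hwmem.trans hfmem.symm) hwf
          | cons c2 cs2 => simp [hb]

-- ===== VERDICT (by name: the statement is the Claim_ definition above) =====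
theorem n_label_py_spec : Claim_equal_n_label_py := by
  intro agg tasks models _ hpre
  unfold Spec_n_label_py
  have hA : n_label_py agg tasks models
      = (match PySem.List.sorted (List.foldl PySem.Set.add PySem.Set.empty (pvValsA agg tasks models)) (fun x => x) false with
          | [] => "N=0"
          | [c] => "N=" ++ PySem.Int.toStr c ++ " " ++ (if c == 1 then "seed" else "seeds") ++ " per cell"
          | _ => "N varies by cell") := by
    show (match PySem.List.sorted (models.foldl (fun s model =>
        tasks.foldl (fun s task =>
          match pvLookup2 agg model task with
          | some inner => PySem.Set.add s (PySem.Dict.getD (PySem.Dict.mk inner) "n" 0)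
          | none => s) s) PySem.Set.empty) (fun x => x) false with
        | [] => "N=0"
        | [c] => "N=" ++ PySem.Int.toStr c ++ " " ++ (if c == 1 then "seed" else "seeds") ++ " per cell"
        | _ => "N varies by cell") = _
    rw [foldA_models]
  have hBfold : n_label_py_alt agg tasks models
      = (match List.foldl pvStepB (none : Option (Int × Int)) (pvValsB agg tasks models) with
          | none => "N=0"
          | some (lo, hi) =>
            if lo != hi then "N varies by cell"
            else "N=" ++ PySem.Int.toStr lo ++ " " ++ (if lo == 1 then "seed" else "seeds") ++ " per cell") := by
    show (match agg.foldl (fun st e =>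
        if PySem.Set.contains (PySem.Set.ofList models) e.1 && PySem.Set.contains (PySem.Set.ofList tasks) e.2.1 then
          pvStepB st (PySem.Dict.getD (PySem.Dict.mk e.2.2) "n" 0)
        else st) (none : Option (Int × Int)) with
        | none => "N=0"
        | some (lo, hi) =>
          if lo != hi then "N varies by cell"
          else "N=" ++ PySem.Int.toStr lo ++ " " ++ (if lo == 1 then "seed" else "seeds") ++ " per cell") = _
    rw [foldB_agg]
  rw [hA, hBfold]
  exact core (pvValsA agg tasks models) (pvValsB agg tasks models)
    (vals_mem_iff agg tasks models hpre.1)
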